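-- pv_equiv track=rewrite | github.com/Mel-Ja/IP | practica7.py | pos_secuencia_ordenada_mas_larga
-- ===== SOURCE A (Python) =====
-- def pos_secuencia_ordenada_mas_larga (lista_numeros: list[int]) -> int:
--
--     inicio_actual: int = 0 #posición inicio de la subsecuencia en análisis
--     largo_actual: int = 1 #largo de la subsecuencia actual
--     inicio_max: int = 0 #posición inicio subsecuencia más larga encontrada
--     largo_max: int = 1 #largo máximo encontrado
--
--     # Recorro a partir del segundo elemento
--     i: int = 1
--     while i < len(lista_numeros):
--         if lista_numeros[i] >= lista_numeros[i - 1]: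
--             #está ordenada ascendentemente
--             largo_actual += 1
--         else:
--             # secuencia interrumpida porque no está ordenada ascendentemente
--             if largo_actual > largo_max:
--                 largo_max = largo_actual
--                 inicio_max = inicio_actual
--
--             inicio_actual = i
--             largo_actual = 1
--
--         i+=1
--
--     if largo_actual > largo_max:
--         inicio_max = inicio_actual
--         largo_max = largo_actual
--
--     return inicio_max
-- ===== SOURCE B (Python) =====
-- def pos_secuencia_ordenada_mas_larga(lista_numeros: list[int]) -> int:
--     # Two passes over run boundaries: collect the start index of every maximal
--     # non-decreasing run, then keep the earliest start whose run is longest.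
--     n = len(lista_numeros)
--     if n == 0:
--         return 0
--     starts = [0] + [i for i in range(1, n)
--                     if lista_numeros[i] < lista_numeros[i - 1]]
--     best_start, best_len = 0, 0
--     for start, end in zip(starts, starts[1:] + [n]):
--         if end - start > best_len:
--             best_start, best_len = start, end - start
--     return best_start
-- ===== Notes on version B (the rewrite author's own statement) =====
-- stated objective: alternative
-- what changed: Replaces A's single forward while-loop tracking four running variables by a two-pass decomposition: first collect the start index of every maximal non-decreasing run, then scan the run boundaries to pick the earliest start of a longest run.
import Mathlib
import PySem

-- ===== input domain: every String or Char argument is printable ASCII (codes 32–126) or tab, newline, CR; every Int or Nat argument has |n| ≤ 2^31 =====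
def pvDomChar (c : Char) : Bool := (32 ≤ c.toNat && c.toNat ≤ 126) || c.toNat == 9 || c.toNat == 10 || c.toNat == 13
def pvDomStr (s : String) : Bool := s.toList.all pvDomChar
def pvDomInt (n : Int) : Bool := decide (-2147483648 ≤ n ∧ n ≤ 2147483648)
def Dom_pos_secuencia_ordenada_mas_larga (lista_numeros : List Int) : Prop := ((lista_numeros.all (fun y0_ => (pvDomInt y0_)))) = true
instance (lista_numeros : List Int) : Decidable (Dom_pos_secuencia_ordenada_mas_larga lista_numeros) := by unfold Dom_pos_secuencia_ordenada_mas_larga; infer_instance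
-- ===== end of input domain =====

-- B replaces A's single forward while-loop with four running variables by a
-- two-pass decomposition over run boundaries (objective: alternative, same cost).

-- ===== PORT A =====
-- while-loop of A as recursion on the index i with A's four state variables
def posLoopA (l : List Int) (i inicio_actual largo_actual inicio_max largo_max : Int) : Int :=
  if _h : i < (l.length : Int) then
    if PySem.List.pyGetD l i 0 ≥ PySem.List.pyGetD l (i - 1) 0 then
      posLoopA l (i + 1) inicio_actual (largo_actual + 1) inicio_max largo_max
    else
      if largo_actual > largo_max then
        posLoopA l (i + 1) i 1 inicio_actual largo_actual
      else
        posLoopA l (i + 1) i 1 inicio_max largo_max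
  else
    if largo_actual > largo_max then inicio_actual else inicio_max
termination_by ((l.length : Int) - i).toNat
decreasing_by all_goals (simp_wf; omega)

def pos_secuencia_ordenada_mas_larga (lista_numeros : List Int) : Int :=
  posLoopA lista_numeros 1 0 1 0 1

-- ===== PORT B =====
-- Source B: starts = [0] + [i for i in range(1,n) if l[i] < l[i-1]];
-- then fold over zip(starts, starts[1:] + [n]) keeping the earliest longest run
def pos_secuencia_ordenada_mas_larga_alt (lista_numeros : List Int) : Int :=
  let n : Int := (lista_numeros.length : Int)
  if n = 0 then 0
  else
    let starts : List Int := 0 :: (PySem.List.pyRange 1 n 1).filter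
        (fun i => PySem.List.pyGetD lista_numeros i 0 < PySem.List.pyGetD lista_numeros (i - 1) 0)
    let pairs := starts.zip (PySem.List.slice starts (some 1) none ++ [n])
    (pairs.foldl (fun acc p => if p.2 - p.1 > acc.2 then (p.1, p.2 - p.1) else acc) (0, 0)).1

-- ===== PRECONDITION & SPEC =====
def Spec_pos_secuencia_ordenada_mas_larga (lista_numeros : List Int) (out : Int) : Prop := out = pos_secuencia_ordenada_mas_larga_alt lista_numeros
instance (lista_numeros : List Int) (out : Int) : Decidable (Spec_pos_secuencia_ordenada_mas_larga lista_numeros out) := by unfold Spec_pos_secuencia_ordenada_mas_larga; infer_instance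

-- ===== CLAIM (what is proved, stated in full; the proofs are below) =====
def Claim_equal_pos_secuencia_ordenada_mas_larga : Prop := ∀ (lista_numeros : List Int), Dom_pos_secuencia_ordenada_mas_larga lista_numeros → Spec_pos_secuencia_ordenada_mas_larga lista_numeros (pos_secuencia_ordenada_mas_larga lista_numeros)

-- ===== LEMMAS AND PROOFS =====

-- ghost version of A's loop: recursion on the remaining suffix, prev = l[i-1]
def loopL (prev : Int) (rest : List Int) (i ia la im lm : Int) : Int :=
  match rest with
  | [] => if la > lm then ia else im
  | x :: xs =>
    if x ≥ prev then loopL x xs (i + 1) ia (la + 1) im lm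
    else if la > lm then loopL x xs (i + 1) i 1 ia la
    else loopL x xs (i + 1) i 1 im lm

-- run-start boundaries of the suffix `rest` whose first absolute index is i
def boundsA : Int → List Int → Int → List Int
  | _, [], _ => []
  | prev, x :: xs, i =>
    if prev ≤ x then boundsA x xs (i + 1) else i :: boundsA x xs (i + 1)

-- every boundary of the suffix starting at absolute index i is ≥ i
lemma mem_boundsA : ∀ (rest : List Int) (prev i b : Int), b ∈ boundsA prev rest i → i ≤ b := by
  intro rest
  induction rest with
  | nil => intro prev i b hb; simp [boundsA] at hb
  | cons x xs ih =>
    intro prev i b hb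
    simp only [boundsA] at hb
    by_cases hc : prev ≤ x
    · rw [if_pos hc] at hb
      have := ih x (i + 1) b hb; omega
    · rw [if_neg hc] at hb
      rcases List.mem_cons.mp hb with h | h
      · omega
      · have := ih x (i + 1) b h; omega

-- B's comprehension over range(1, n) computes exactly the boundaries of the suffix
lemma filter_eq_boundsA : ∀ (rest l : List Int) (i : Nat), 1 ≤ i → l.drop i = rest →
    (PySem.List.pyRange (i : Int) (l.length : Int) 1).filter
      (fun j => PySem.List.pyGetD l j 0 < PySem.List.pyGetD l (j - 1) 0)
    = boundsA (l.getD (i - 1) 0) rest (i : Int) := by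
  intro rest
  induction rest with
  | nil =>
    intro l i hi hd
    have hlen : l.length ≤ i := by
      have := congrArg List.length hd
      simp [List.length_drop] at this; omega
    rw [PySem.List.pyRange_one_eq_nil (by exact_mod_cast hlen)]
    simp [boundsA]
  | cons x xs ih =>
    intro l i hi hd
    have hilt : i < l.length := by
      have := congrArg List.length hd
      simp [List.length_drop] at this; omega
    have hcd := List.getElem_cons_drop hilt
    rw [hd] at hcd
    have hx : l[i] = x := ((List.cons.injEq ..).mp hcd.symm).1.symm
    have hxs : l.drop (i + 1) = xs := ((List.cons.injEq ..).mp hcd.symm).2.symm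
    have hgi : PySem.List.pyGetD l (i : Int) 0 = x := by
      simp [PySem.List.pyGetD_natCast, List.getD_eq_getElem?_getD, hilt, hx]
    have hgp : PySem.List.pyGetD l ((i : Int) - 1) 0 = l.getD (i - 1) 0 := by
      have h : ((i : Int) - 1) = ((i - 1 : Nat) : Int) := by omega
      rw [h, PySem.List.pyGetD_natCast]
    have hgd : l.getD ((i + 1) - 1) 0 = x := by
      simp [List.getD_eq_getElem?_getD, hilt, hx]
    have ihh := ih l (i + 1) (by omega) hxs
    rw [hgd] at ihh
    have hstep : ((i + 1 : Nat) : Int) = (i : Int) + 1 := by push_cast; ring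
    rw [hstep] at ihh
    rw [PySem.List.pyRange_one_cons (by exact_mod_cast hilt), List.filter_cons]
    simp only [hgi, hgp, ihh, boundsA]
    by_cases hc : l.getD (i - 1) 0 ≤ x
    · have hnc : ¬ (x < l.getD (i - 1) 0) := not_lt.mpr hc
      rw [if_pos hc, if_neg (by simpa using hnc)]
    · have hlt : x < l.getD (i - 1) 0 := lt_of_not_ge hc
      rw [if_neg hc, if_pos (by simpa using hlt)]

-- the ghost loop equals B's boundary fold over the suffix's boundaries
lemma loopL_eq_fold : ∀ (rest : List Int) (prev i la im lm : Int), 1 ≤ la → 1 ≤ lm →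
    loopL prev rest i (i - la) la im lm =
    (List.foldl (fun acc p => if p.2 - p.1 > acc.2 then (p.1, p.2 - p.1) else acc) (im, lm)
      (((i - la) :: boundsA prev rest i).zip
        (boundsA prev rest i ++ [i + (rest.length : Int)]))).1 := by
  intro rest
  induction rest with
  | nil =>
    intro prev i la im lm hla hlm
    simp only [loopL, boundsA, List.length_nil, List.zip_cons_cons, List.nil_append,
      List.zip_nil_right, List.foldl_cons, List.foldl_nil, Int.natCast_zero, add_zero]
    by_cases h : la > lm
    · rw [if_pos h, if_pos (by omega : i - (i - la) > lm)]
    · rw [if_neg h, if_neg (by omega : ¬ i - (i - la) > lm)]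
  | cons x xs ih =>
    intro prev i la im lm hla hlm
    have hlen : i + ((x :: xs).length : Int) = (i + 1) + (xs.length : Int) := by
      push_cast [List.length_cons]; ring
    simp only [loopL, boundsA]
    by_cases hc : prev ≤ x
    · rw [if_pos (show x ≥ prev from hc), if_pos hc]
      have ihh := ih x (i + 1) (la + 1) im lm (by omega) hlm
      have he : (i + 1) - (la + 1) = i - la := by ring
      rw [he] at ihh
      rw [ihh, hlen]
    · rw [if_neg (show ¬ x ≥ prev from hc), if_neg hc, hlen]
      have hzip : ((i - la) :: i :: boundsA x xs (i + 1)).zip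
          ((i :: boundsA x xs (i + 1)) ++ [(i + 1) + (xs.length : Int)])
          = (i - la, i) :: ((i :: boundsA x xs (i + 1)).zip
              (boundsA x xs (i + 1) ++ [(i + 1) + (xs.length : Int)])) := by
        simp [List.zip_cons_cons]
      rw [hzip, List.foldl_cons]
      dsimp only
      have hsub : i - (i - la) = la := by ring
      rw [hsub]
      by_cases hm : la > lm
      · rw [if_pos hm, if_pos hm]
        have ihh := ih x (i + 1) 1 (i - la) la (by omega) (by omega)
        have he : (i + 1) - 1 = i := by ring
        rw [he] at ihh
        rw [ihh]
      · rw [if_neg hm, if_neg hm]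
        have ihh := ih x (i + 1) 1 im lm (by omega) hlm
        have he : (i + 1) - 1 = i := by ring
        rw [he] at ihh
        rw [ihh]

-- A's loop from a fresh index equals the ghost loop over the dropped suffix
lemma posLoopA_eq_loopL : ∀ (rest l : List Int) (i : Nat) (ia la im lm : Int),
    1 ≤ i → l.drop i = rest →
    posLoopA l (i : Int) ia la im lm = loopL (l.getD (i - 1) 0) rest (i : Int) ia la im lm := by
  intro rest
  induction rest with
  | nil =>
    intro l i ia la im lm hi hd
    have hlen : l.length ≤ i := by
      have := congrArg List.length hd
      simp [List.length_drop] at this; omega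
    rw [posLoopA, dif_neg (by omega)]
    simp [loopL]
  | cons x xs ih =>
    intro l i ia la im lm hi hd
    have hilt : i < l.length := by
      have := congrArg List.length hd
      simp [List.length_drop] at this; omega
    have hcd := List.getElem_cons_drop hilt
    rw [hd] at hcd
    have hx : l[i] = x := ((List.cons.injEq ..).mp hcd.symm).1.symm
    have hxs : l.drop (i + 1) = xs := ((List.cons.injEq ..).mp hcd.symm).2.symm
    have hgi : PySem.List.pyGetD l (i : Int) 0 = x := by
      simp [PySem.List.pyGetD_natCast, List.getD_eq_getElem?_getD, hilt, hx]
    have hgp : PySem.List.pyGetD l ((i : Int) - 1) 0 = l.getD (i - 1) 0 := by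
      have h : ((i : Int) - 1) = ((i - 1 : Nat) : Int) := by omega
      rw [h, PySem.List.pyGetD_natCast]
    have hgd : l.getD ((i + 1) - 1) 0 = x := by
      simp [List.getD_eq_getElem?_getD, hilt, hx]
    have ihh := ih l (i + 1) ia (la + 1) im lm (by omega) hxs
    have ihh2 := fun (im' lm' : Int) => ih l (i + 1) ((i : Int)) 1 im' lm' (by omega) hxs
    rw [hgd] at ihh ihh2
    have hstep : ((i + 1 : Nat) : Int) = (i : Int) + 1 := by push_cast; ring
    rw [hstep] at ihh ihh2
    rw [posLoopA, dif_pos (by omega), hgi, hgp]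
    simp only [loopL]
    by_cases hc : x ≥ l.getD (i - 1) 0
    · rw [if_pos hc, if_pos hc, ihh]
    · rw [if_neg hc, if_neg hc]
      by_cases hm : la > lm
      · rw [if_pos hm, if_pos hm, ihh2 ia la]
      · rw [if_neg hm, if_neg hm, ihh2 im lm]

-- ===== VERDICT (by name: the statement is the Claim_ definition above) =====
theorem pos_secuencia_ordenada_mas_larga_spec : Claim_equal_pos_secuencia_ordenada_mas_larga := by
  intro l _
  unfold Spec_pos_secuencia_ordenada_mas_larga
  match l with
  | [] =>
    rw [pos_secuencia_ordenada_mas_larga, posLoopA]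
    simp [pos_secuencia_ordenada_mas_larga_alt]
  | h :: t =>
    have hb := posLoopA_eq_loopL t (h :: t) 1 0 1 0 1 (le_refl 1) (by simp)
    have hf := filter_eq_boundsA t (h :: t) 1 (le_refl 1) (by simp)
    have hgd : (h :: t).getD (1 - 1) 0 = h := rfl
    rw [hgd] at hb hf
    norm_num at hb
    simp only [Nat.cast_one] at hf
    have hm := loopL_eq_fold t h 1 1 0 1 (by omega) (by omega)
    have h10 : (1 : Int) - 1 = 0 := by norm_num
    rw [h10] at hm
    have hn : ((h :: t).length : Int) = 1 + (t.length : Int) := by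
      push_cast [List.length_cons]; ring
    rw [pos_secuencia_ordenada_mas_larga, hb, hm]
    simp only [pos_secuencia_ordenada_mas_larga_alt]
    rw [if_neg (by omega), hf, PySem.List.slice_from_one, List.tail_cons, hn]
    rcases hB : boundsA h t 1 with _ | ⟨b, bs⟩
    · simp only [List.nil_append, List.zip_cons_cons, List.zip_nil_right,
        List.foldl_cons, List.foldl_nil]
      try dsimp only
      split_ifs <;> rfl
    · have hb1 : (1 : Int) ≤ b := mem_boundsA t h 1 b (by rw [hB]; exact List.mem_cons_self ..)
      simp only [List.cons_append, List.zip_cons_cons, List.foldl_cons]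
      try dsimp only
      have h1 : (if b - 0 > (1 : Int) then ((0 : Int), b - 0) else (0, 1)) = (0, b) := by
        by_cases hb2 : b - 0 > (1 : Int)
        · rw [if_pos hb2]; norm_num
        · rw [if_neg hb2]; have : b = 1 := by omega
          rw [this]
      have h0 : (if b - 0 > (0 : Int) then ((0 : Int), b - 0) else (0, 0)) = (0, b) := by
        rw [if_pos (by omega)]; norm_num
      rw [h1, h0]
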